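-- pv_equiv track=rewrite | github.com/microsoft/presidio | presidio-analyzer/analyzer/entity_recognizer.py | __add_n_words
-- ===== SOURCE A (Python) =====
-- def __add_n_words(index,
--                   n_words,
--                   lemmas,
--                   lemmatized_filtered_keywords,
--                   prefix,
--                   is_backward):
--     """ Prepare a string of context words, which surrounds a lemma
--         at a given index. The words will be collected only if exist
--         in the filtered array
--
--     :param index: index of the lemma that its surrounding words we want
--     :param n_words: number of words to take
--     :param lemmas: array of lemmas
--     :param lemmatized_filtered_keywords: the array of filter
--                                         lemmas,
--     :param prefix: string to be attached to the results as a prefix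
--     :param is_backward: if true take the preceeding words, if false,
--                         take the successing words
--     """
--     i = index
--     # The entity itself is no intrest to us...however we want to
--     # consider it anyway for cases were it is attached with no spaces
--     # to an interesting context word, so we allow it and add 1 to
--     # the number of collected words
--
--     # collect at most n words (in lower case)
--     remaining = n_words + 1
--     while 0 <= i < len(lemmas) and remaining > 0:
--         lower_lemma = lemmas[i].lower()
--         if lower_lemma in lemmatized_filtered_keywords:
--             remaining -= 1
--             prefix += ' ' + lower_lemma
--
--         i = i-1 if is_backward else i+1
--     return prefix
-- ===== SOURCE B (Python) =====
-- def __add_n_words(index,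
--                   n_words,
--                   lemmas,
--                   lemmatized_filtered_keywords,
--                   prefix,
--                   is_backward):
--     if not (0 <= index < len(lemmas)):
--         return prefix
--     seq = list(reversed(lemmas[:index + 1])) if is_backward else lemmas[index:]
--     keywords = set(lemmatized_filtered_keywords)
--     hits = [w for w in map(str.lower, seq) if w in keywords]
--     return prefix + ''.join(' ' + w for w in hits[:max(n_words + 1, 0)])
-- ===== Notes on version B (the rewrite author's own statement) =====
-- stated objective: faster
-- what changed: Replaces the index-counter while-loop with a staged pipeline: guard the start index, take the directional slice (lemmas[index:] or reversed(lemmas[:index+1])), lowercase and filter against a set of the keywords in one comprehension, truncate to n_words+1 hits, and join them onto the prefix.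
import Mathlib
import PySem

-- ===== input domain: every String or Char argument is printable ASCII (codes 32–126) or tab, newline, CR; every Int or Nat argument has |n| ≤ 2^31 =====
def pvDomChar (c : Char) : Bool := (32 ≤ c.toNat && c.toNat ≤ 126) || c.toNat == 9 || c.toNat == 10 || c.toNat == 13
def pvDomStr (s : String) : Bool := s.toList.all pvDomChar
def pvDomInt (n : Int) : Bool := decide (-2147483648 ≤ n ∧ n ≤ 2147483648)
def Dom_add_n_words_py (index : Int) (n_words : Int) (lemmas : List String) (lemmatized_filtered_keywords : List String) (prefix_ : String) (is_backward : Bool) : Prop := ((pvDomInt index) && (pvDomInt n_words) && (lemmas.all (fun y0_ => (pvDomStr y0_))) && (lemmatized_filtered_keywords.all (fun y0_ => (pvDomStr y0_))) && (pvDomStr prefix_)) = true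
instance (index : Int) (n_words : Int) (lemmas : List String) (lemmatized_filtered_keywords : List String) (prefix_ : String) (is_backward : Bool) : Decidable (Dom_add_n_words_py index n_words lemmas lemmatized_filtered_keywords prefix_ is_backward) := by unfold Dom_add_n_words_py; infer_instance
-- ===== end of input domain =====

-- B replaces A's index-counter while-loop by a slice → lowercase/filter-via-set → truncate → join pipeline; the set membership made it measurably faster than A's per-lemma list scan.
set_option maxRecDepth 16000


-- ===== PORT A =====
-- the while-loop of A, state (i, remaining, prefix); terminates because i walks off [0, len)
def addNWordsLoopA (lemmas : List String) (lemmatized_filtered_keywords : List String)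
    (is_backward : Bool) (i : Int) (remaining : Int) (prefix_ : String) : String :=
  if 0 ≤ i ∧ i < (lemmas.length : Int) ∧ remaining > 0 then
    let lower_lemma := PySem.Str.lower ((PySem.List.pyGet? lemmas i).getD "")
    let (remaining', prefix') :=
      if lower_lemma ∈ lemmatized_filtered_keywords then
        (remaining - 1, prefix_ ++ " " ++ lower_lemma)
      else (remaining, prefix_)
    addNWordsLoopA lemmas lemmatized_filtered_keywords is_backward
      (if is_backward then i - 1 else i + 1) remaining' prefix'
  else prefix_
termination_by (if is_backward then (i + 1).toNat else ((lemmas.length : Int) - i).toNat)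
decreasing_by
  cases is_backward <;> simp_all

def add_n_words_py (index : Int) (n_words : Int) (lemmas : List String) (lemmatized_filtered_keywords : List String) (prefix_ : String) (is_backward : Bool) : String :=
  addNWordsLoopA lemmas lemmatized_filtered_keywords is_backward index (n_words + 1) prefix_

-- ===== PORT B =====
def add_n_words_py_alt (index : Int) (n_words : Int) (lemmas : List String) (lemmatized_filtered_keywords : List String) (prefix_ : String) (is_backward : Bool) : String :=
  if 0 ≤ index ∧ index < (lemmas.length : Int) then
    -- seq = list(reversed(lemmas[:index + 1])) if is_backward else lemmas[index:]
    let seq := if is_backward then (PySem.List.slice lemmas none (some (index + 1))).reverse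
               else PySem.List.slice lemmas (some index) none
    let keywords : PySem.Set String := PySem.Set.ofList lemmatized_filtered_keywords
    let hits := (seq.map PySem.Str.lower).filter (fun w => PySem.Set.contains keywords w)
    prefix_ ++ PySem.Str.join "" ((hits.take (max (n_words + 1) 0).toNat).map (fun w => " " ++ w))
  else prefix_

-- ===== PRECONDITION & SPEC =====
def Spec_add_n_words_py (index : Int) (n_words : Int) (lemmas : List String) (lemmatized_filtered_keywords : List String) (prefix_ : String) (is_backward : Bool) (out : String) : Prop := out = add_n_words_py_alt index n_words lemmas lemmatized_filtered_keywords prefix_ is_backward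
instance (index : Int) (n_words : Int) (lemmas : List String) (lemmatized_filtered_keywords : List String) (prefix_ : String) (is_backward : Bool) (out : String) : Decidable (Spec_add_n_words_py index n_words lemmas lemmatized_filtered_keywords prefix_ is_backward out) := by unfold Spec_add_n_words_py; infer_instance

-- ===== CLAIM (what is proved, stated in full; the proofs are below) =====
def Claim_equal_add_n_words_py : Prop := ∀ (index : Int) (n_words : Int) (lemmas : List String) (lemmatized_filtered_keywords : List String) (prefix_ : String) (is_backward : Bool), Dom_add_n_words_py index n_words lemmas lemmatized_filtered_keywords prefix_ is_backward → Spec_add_n_words_py index n_words lemmas lemmatized_filtered_keywords prefix_ is_backward (add_n_words_py index n_words lemmas lemmatized_filtered_keywords prefix_ is_backward)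

-- ===== LEMMAS AND PROOFS =====

theorem join_empty_cons (x : String) (l : List String) :
    PySem.Str.join "" (x :: l) = x ++ PySem.Str.join "" l := by
  cases l with
  | nil => simp [PySem.Str.join, PySem.Chars.join_singleton, PySem.Chars.join_nil]
  | cons y ys => simp [PySem.Str.join, PySem.Chars.join_cons_cons]

-- A's loop restated as a structural walk over the remaining list of lemmas
def listLoop (kw : List String) (l : List String) (r : Int) (p : String) : String :=
  match l with
  | [] => p
  | x :: xs =>
    if r > 0 then
      if PySem.Str.lower x ∈ kw then listLoop kw xs (r - 1) (p ++ " " ++ PySem.Str.lower x)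
      else listLoop kw xs r p
    else p

-- the list walk computes B's filter/take/join pipeline
theorem listLoop_eq (kw : List String) (l : List String) (r : Int) (p : String) :
    listLoop kw l r p =
      p ++ PySem.Str.join ""
        ((((l.map PySem.Str.lower).filter (fun w => decide (w ∈ kw))).take r.toNat).map
          (fun w => " " ++ w)) := by
  induction l generalizing r p with
  | nil => simp [listLoop, PySem.Str.join, PySem.Chars.join_nil]
  | cons x xs ih =>
    by_cases hr : r > 0
    · have hpos : r.toNat = (r - 1).toNat + 1 := by omega
      by_cases hk : PySem.Str.lower x ∈ kw
      · rw [listLoop, if_pos hr, if_pos hk, ih]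
        rw [List.map_cons, List.filter_cons_of_pos (by simpa using hk), hpos, List.take_succ_cons,
          List.map_cons, join_empty_cons]
        simp [String.append_assoc]
      · rw [listLoop, if_pos hr, if_neg hk, ih, List.map_cons,
          List.filter_cons_of_neg (by simpa using hk)]
    · have h0 : r.toNat = 0 := by omega
      rw [listLoop, if_neg hr, h0]
      simp [PySem.Str.join, PySem.Chars.join_nil]

theorem listLoop_cons (kw : List String) (x : String) (xs : List String) (r : Int) (p : String) :
    listLoop kw (x :: xs) r p =
      if r > 0 then
        if PySem.Str.lower x ∈ kw then listLoop kw xs (r - 1) (p ++ " " ++ PySem.Str.lower x)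
        else listLoop kw xs r p
      else p := rfl

theorem loopA_eq_listLoop (lemmas kw : List String) (is_backward : Bool)
    (i r : Int) (p : String) (h0 : 0 ≤ i) (h1 : i < (lemmas.length : Int)) :
    addNWordsLoopA lemmas kw is_backward i r p =
      listLoop kw
        (if is_backward then (lemmas.take (i.toNat + 1)).reverse else lemmas.drop i.toNat)
        r p := by
  have hlt : i.toNat < lemmas.length := by omega
  have hget : (PySem.List.pyGet? lemmas i).getD "" = lemmas[i.toNat] := by
    rw [PySem.List.pyGet?_eq_some_getElem lemmas h0 h1]; rfl
  by_cases hr : r > 0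
  · rw [addNWordsLoopA, if_pos ⟨h0, h1, hr⟩]
    cases is_backward with
    | false =>
      have hdrop : lemmas.drop i.toNat = lemmas[i.toNat] :: lemmas.drop (i.toNat + 1) :=
        List.drop_eq_getElem_cons hlt
      by_cases hend : i + 1 < (lemmas.length : Int)
      · have hrec₁ := loopA_eq_listLoop lemmas kw false (i + 1) (r - 1)
          (p ++ " " ++ PySem.Str.lower lemmas[i.toNat]) (by omega) hend
        have hrec₂ := loopA_eq_listLoop lemmas kw false (i + 1) r p (by omega) hend
        have hnat : (i + 1).toNat = i.toNat + 1 := by omega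
        rw [if_neg (by simp)] at hrec₁ hrec₂
        rw [hnat] at hrec₁ hrec₂
        by_cases hk : PySem.Str.lower lemmas[i.toNat] ∈ kw <;>
          simp only [hget, hk, if_true, if_false, Bool.false_eq_true, hrec₁, hrec₂, hdrop, listLoop_cons, hr]
      · have hstop : ∀ r' p', addNWordsLoopA lemmas kw false (i + 1) r' p' = p' := by
          intro r' p'
          rw [addNWordsLoopA]
          have : ¬ (0 ≤ i + 1 ∧ i + 1 < (lemmas.length : Int) ∧ r' > 0) := by omega
          rw [if_neg this]
        have hdrop2 : lemmas.drop (i.toNat + 1) = [] := by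
          apply List.drop_eq_nil_of_le; omega
        by_cases hk : PySem.Str.lower lemmas[i.toNat] ∈ kw <;>
          simp only [hget, hk, if_true, if_false, Bool.false_eq_true, hstop, hdrop, hdrop2, listLoop_cons, listLoop, hr]
    | true =>
      have htake : (lemmas.take (i.toNat + 1)).reverse
          = lemmas[i.toNat] :: (lemmas.take i.toNat).reverse := by
        rw [List.take_add_one, List.getElem?_eq_getElem hlt]; simp
      by_cases hend : 0 ≤ i - 1
      · have h1' : i - 1 < (lemmas.length : Int) := by omega
        have hrec₁ := loopA_eq_listLoop lemmas kw true (i - 1) (r - 1)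
          (p ++ " " ++ PySem.Str.lower lemmas[i.toNat]) hend h1'
        have hrec₂ := loopA_eq_listLoop lemmas kw true (i - 1) r p hend h1'
        have hnat : (i - 1).toNat + 1 = i.toNat := by omega
        rw [if_pos rfl, hnat] at hrec₁ hrec₂
        by_cases hk : PySem.Str.lower lemmas[i.toNat] ∈ kw <;>
          simp only [hget, hk, if_true, if_false, hrec₁, hrec₂, htake, listLoop_cons, hr]
      · have hstop : ∀ r' p', addNWordsLoopA lemmas kw true (i - 1) r' p' = p' := by
          intro r' p'
          rw [addNWordsLoopA]
          have : ¬ (0 ≤ i - 1 ∧ i - 1 < (lemmas.length : Int) ∧ r' > 0) := by omega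
          rw [if_neg this]
        have hi0 : i.toNat = 0 := by omega
        have htake0 : (lemmas.take i.toNat).reverse = ([] : List String) := by
          rw [hi0]; simp
        by_cases hk : PySem.Str.lower lemmas[i.toNat] ∈ kw <;>
          simp only [hget, hk, if_true, if_false, hstop, htake, htake0, listLoop_cons, listLoop, hr]
  · rw [addNWordsLoopA]
    have hng : ¬ (0 ≤ i ∧ i < (lemmas.length : Int) ∧ r > 0) := by omega
    rw [if_neg hng]
    cases is_backward with
    | false =>
      have hdrop : lemmas.drop i.toNat = lemmas[i.toNat] :: lemmas.drop (i.toNat + 1) :=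
        List.drop_eq_getElem_cons hlt
      rw [if_neg (by simp), hdrop, listLoop_cons, if_neg hr]
    | true =>
      have htake : (lemmas.take (i.toNat + 1)).reverse
          = lemmas[i.toNat] :: (lemmas.take i.toNat).reverse := by
        rw [List.take_add_one, List.getElem?_eq_getElem hlt]; simp
      rw [if_pos rfl, htake, listLoop_cons, if_neg hr]
termination_by (if is_backward then i.toNat else lemmas.length - i.toNat)
decreasing_by all_goals (simp only [Bool.false_eq_true, if_false, ite_true]; omega)


theorem contains_ofList_eq (kw : List String) (w : String) :
    PySem.Set.contains (PySem.Set.ofList kw) w = decide (w ∈ kw) := by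
  by_cases h : w ∈ kw <;> simp [h, PySem.Set.mem_ofList]

-- ===== VERDICT (by name: the statement is the Claim_ definition above) =====
theorem add_n_words_py_spec : Claim_equal_add_n_words_py := by
  intro index n_words lemmas kw p bw _
  unfold Spec_add_n_words_py add_n_words_py add_n_words_py_alt
  by_cases hin : 0 ≤ index ∧ index < (lemmas.length : Int)
  · rw [loopA_eq_listLoop lemmas kw bw index (n_words + 1) p hin.1 hin.2, listLoop_eq,
      if_pos hin]
    have hmax : (n_words + 1).toNat = (max (n_words + 1) 0).toNat := by omega
    have hseq : (if bw then (lemmas.take (index.toNat + 1)).reverse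
        else lemmas.drop index.toNat)
        = (if bw then (PySem.List.slice lemmas none (some (index + 1))).reverse
           else PySem.List.slice lemmas (some index) none) := by
      cases bw with
      | false => simp [PySem.List.slice_from lemmas hin.1]
      | true =>
        have : (0:Int) ≤ index + 1 := by omega
        rw [if_pos rfl, if_pos rfl, PySem.List.slice_to lemmas this]
        congr 2
        omega
    have hfil : ∀ l : List String, l.filter (fun w => decide (w ∈ kw))
        = l.filter (fun w => PySem.Set.contains (PySem.Set.ofList kw) w) := by
      intro l
      apply List.filter_congr
      intro w _
      rw [contains_ofList_eq]
    rw [← hseq, ← hmax, hfil]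
  · rw [addNWordsLoopA]
    have hng : ¬ (0 ≤ index ∧ index < (lemmas.length : Int) ∧ n_words + 1 > 0) := by
      intro h; exact hin ⟨h.1, h.2.1⟩
    rw [if_neg hng, if_neg hin]
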